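-- pv_equiv track=rewrite | github.com/teiknsmith/dle | word/wordle.py | genclue
-- ===== SOURCE A (Python) =====
-- from collections import Counter, defaultdict
--
-- def genclue(guess, targ):
--     res = ['B'] * 5
--     uneqis = set()
--     for i in range(5):
--         if guess[i] == targ[i]:
--             res[i] = 'G'
--         else:
--             uneqis.add(i)
--     guesscnt = Counter(c for i, c in enumerate(guess) if i in uneqis)
--     targcnt = Counter(c for i, c in enumerate(targ) if i in uneqis)
--     for k, c in guesscnt.items():
--         if k in targcnt:
--             n = min(c, targcnt[k])
--             for i in uneqis:
--                 if guess[i] == k: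
--                     res[i] = 'Y'
--                     n -= 1
--                     if not n:
--                         break
--     return ''.join(res)
-- ===== SOURCE B (Python) =====
-- from collections import Counter
--
-- def genclue(guess, targ):
--     remaining = Counter(targ[i] for i in range(5) if guess[i] != targ[i])
--     out = []
--     for i in range(5):
--         if guess[i] == targ[i]:
--             out.append('G')
--         elif remaining[guess[i]] > 0:
--             out.append('Y')
--             remaining[guess[i]] -= 1
--         else:
--             out.append('B')
--     return ''.join(out)
-- ===== Notes on version B (the rewrite author's own statement) =====
-- stated objective: idiomatic
-- what changed: Replaces A's two Counters over the full strings, the per-letter min computation and the nested per-letter marking loop by a single Counter of the five unmatched target letters consumed in one left-to-right positional pass that appends G/Y/B directly.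
import Mathlib
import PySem

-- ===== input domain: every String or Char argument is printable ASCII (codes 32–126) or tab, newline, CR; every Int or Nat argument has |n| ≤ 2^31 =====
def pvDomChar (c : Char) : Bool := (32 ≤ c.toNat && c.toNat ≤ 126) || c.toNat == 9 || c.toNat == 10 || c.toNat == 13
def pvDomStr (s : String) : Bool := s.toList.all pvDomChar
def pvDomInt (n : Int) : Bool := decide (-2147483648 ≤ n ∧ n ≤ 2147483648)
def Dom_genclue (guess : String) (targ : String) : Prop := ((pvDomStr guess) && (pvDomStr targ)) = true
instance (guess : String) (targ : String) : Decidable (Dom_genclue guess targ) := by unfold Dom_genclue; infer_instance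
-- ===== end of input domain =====

-- B replaces A's two Counters, per-letter min and nested marking loop by one Counter of
-- unmatched target letters consumed in a single left-to-right pass over only the 5 clue
-- positions (objective: idiomatic; a timing run also measured it faster, since A scans
-- the entire strings).

-- ===== PORT A =====
-- inner 'for i in uneqis: ... break' loop of A. uneqis is a set of the ints 0..4 inserted in
-- ascending order; CPython iterates such a small-int set in exactly that (= insertion) order,
-- so iterating the PySem.Set's insertion-ordered element list is exact here.
def gcInner (g : List Char) (k : Char) : List Int → List Char → Int → List Char
  | [], res, _ => res
  | i :: rest, res, n =>
    if PySem.List.pyGet? g i = some k then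
      if n - 1 = 0 then (res.set i.toNat 'Y')
      else gcInner g k rest (res.set i.toNat 'Y') (n - 1)
    else gcInner g k rest res n

def genclue (guess : String) (targ : String) : String :=
  let g := guess.toList
  let t := targ.toList
  let st := (PySem.List.pyRange 0 5 1).foldl
      (fun (st : List Char × PySem.Set Int) i =>
        if PySem.List.pyGet? g i = PySem.List.pyGet? t i then (st.1.set i.toNat 'G', st.2)
        else (st.1, PySem.Set.add st.2 i))
      (List.replicate 5 'B', PySem.Set.empty)
  let uneqis := st.2
  let guesscnt := PySem.Dict.counter
      (((PySem.List.enumerate g).filter (fun p => PySem.Set.contains uneqis p.1)).map (·.2))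
  let targcnt := PySem.Dict.counter
      (((PySem.List.enumerate t).filter (fun p => PySem.Set.contains uneqis p.1)).map (·.2))
  let res := guesscnt.items.foldl
      (fun res kc =>
        if targcnt.contains kc.1 then
          gcInner g kc.1 uneqis res (min kc.2 (PySem.Dict.getD targcnt kc.1 0))
        else res) st.1
  String.ofList res

-- ===== PORT B =====
def genclue_alt (guess : String) (targ : String) : String :=
  let g := guess.toList
  let t := targ.toList
  let remaining := PySem.Dict.counter
      (((PySem.List.pyRange 0 5 1).filter
          (fun i => !(PySem.List.pyGet? g i == PySem.List.pyGet? t i))).map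
        (fun i => PySem.List.pyGet? t i))
  let st := (PySem.List.pyRange 0 5 1).foldl
      (fun (st : List Char × PySem.Dict (Option Char) Int) i =>
        if PySem.List.pyGet? g i = PySem.List.pyGet? t i then (st.1 ++ ['G'], st.2)
        else if 0 < PySem.Dict.getD st.2 (PySem.List.pyGet? g i) 0 then
          (st.1 ++ ['Y'], PySem.Dict.modify st.2 (PySem.List.pyGet? g i) 0 (· - 1))
        else (st.1 ++ ['B'], st.2))
      ([], remaining)
  String.ofList st.1

-- ===== PRECONDITION & SPEC =====
-- Pre_ excludes exactly the inputs on which guess[i] / targ[i] raises IndexError in A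
-- (a string shorter than 5 characters); B raises there as well.
def Pre_genclue (guess : String) (targ : String) : Prop :=
  5 ≤ guess.toList.length ∧ 5 ≤ targ.toList.length
instance (guess : String) (targ : String) : Decidable (Pre_genclue guess targ) := by
  unfold Pre_genclue; infer_instance
def pvWitness_genclue : String × String := ("abbey", "babes")

def Spec_genclue (guess : String) (targ : String) (out : String) : Prop := out = genclue_alt guess targ
instance (guess : String) (targ : String) (out : String) : Decidable (Spec_genclue guess targ out) := by unfold Spec_genclue; infer_instance

-- ===== CLAIM (what is proved, stated in full; the proofs are below) =====
def Claim_equal_genclue : Prop := ∀ (guess : String) (targ : String), Dom_genclue guess targ → Pre_genclue guess targ → Spec_genclue guess targ (genclue guess targ)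

-- ===== LEMMAS AND PROOFS =====
def qeq (g t : List Char) (i : Int) : Bool := PySem.List.pyGet? g i == PySem.List.pyGet? t i
def idx5 : List Int := [0, 1, 2, 3, 4]
def uListP (g t : List Char) : List Int := idx5.filter (fun i => !qeq g t i)
def guP (g t : List Char) : List Char := (uListP g t).map (fun i => PySem.List.pyGetD g i '?')
def tuA (g t : List Char) : List Char := (uListP g t).map (fun i => PySem.List.pyGetD t i '?')
def rankP (g t : List Char) (i : Int) : Nat :=
  (uListP g t).countP (fun x => PySem.List.pyGet? g x == PySem.List.pyGet? g i && decide (x < i))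
def cTP (g t : List Char) (i : Int) : Nat :=
  ((uListP g t).map (fun i => PySem.List.pyGet? t i)).count (PySem.List.pyGet? g i)
def targetP (g t : List Char) : List Char :=
  idx5.map (fun i => if qeq g t i then 'G' else if rankP g t i < cTP g t i then 'Y' else 'B')

-- L1: length of a set-fold
theorem len_setFold (is : List Int) (c : Char) (res : List Char) :
    (is.foldl (fun r i => r.set i.toNat c) res).length = res.length := by
  induction is generalizing res with
  | nil => rfl
  | cons i is ih => simp [List.foldl_cons, ih, List.length_set]

-- L2: positional content of a set-fold
theorem get_setFold (is : List Int) (c : Char) (res : List Char) (j : Nat)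
    (hnn : ∀ i ∈ is, 0 ≤ i) :
    (is.foldl (fun r i => r.set i.toNat c) res)[j]? =
      if (j : Int) ∈ is ∧ j < res.length then some c else res[j]? := by
  induction is generalizing res with
  | nil => simp
  | cons i is ih =>
    have hi : 0 ≤ i := hnn i (by simp)
    rw [List.foldl_cons, ih _ (fun x hx => hnn x (by simp [hx]))]
    rw [List.length_set, List.getElem?_set]
    by_cases hji : (j : Int) = i
    · have : i.toNat = j := by omega
      by_cases hmem : (j : Int) ∈ is <;> by_cases hlen : j < res.length <;>
        simp_all [List.mem_cons]
    · have : i.toNat ≠ j := by omega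
      by_cases hmem : (j : Int) ∈ is <;> by_cases hlen : j < res.length <;>
        simp_all [List.mem_cons]

-- L3: gcInner is a take-of-filter set-fold
theorem gcInner_eq (g : List Char) (k : Char) (is : List Int) (res : List Char) (n : Int)
    (hn : 1 ≤ n) :
    gcInner g k is res n =
      ((is.filter (fun i => PySem.List.pyGet? g i == some k)).take n.toNat).foldl
        (fun r i => r.set i.toNat 'Y') res := by
  induction is generalizing res n with
  | nil => simp [gcInner]
  | cons i is ih =>
    by_cases hm : PySem.List.pyGet? g i = some k
    · have hb : (PySem.List.pyGet? g i == some k) = true := beq_iff_eq.mpr hm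
      have hsucc : n.toNat = (n - 1).toNat + 1 := by omega
      have hfil : List.filter (fun i => PySem.List.pyGet? g i == some k) (i :: is)
          = i :: List.filter (fun i => PySem.List.pyGet? g i == some k) is := by
        simp [hb]
      rw [gcInner, if_pos hm, hfil, hsucc, List.take_succ_cons, List.foldl_cons]
      by_cases h1 : n - 1 = 0
      · rw [if_pos h1, h1]
        simp
      · rw [if_neg h1, ih _ _ (by omega)]
    · have hb : (PySem.List.pyGet? g i == some k) = false := by
        simpa using hm
      have hfil : List.filter (fun i => PySem.List.pyGet? g i == some k) (i :: is)
          = List.filter (fun i => PySem.List.pyGet? g i == some k) is := by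
        simp [hb]
      rw [gcInner, if_neg hm, hfil]
      exact ih _ _ hn

-- L4: membership in a take-prefix of a strictly sorted list
theorem mem_take_sorted (l : List Int) (hl : l.Pairwise (· < ·)) (j : Int) (hj : j ∈ l)
    (m : Nat) : j ∈ l.take m ↔ l.countP (fun x => decide (x < j)) < m := by
  induction l generalizing m with
  | nil => simp at hj
  | cons x l ih =>
    have hx := (List.pairwise_cons.mp hl).1
    by_cases hxj : x = j
    · subst hxj
      have hcnt : l.countP (fun y => decide (y < x)) = 0 := by
        rw [List.countP_eq_zero]
        intro a ha
        have := hx a ha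
        simp
        omega
      cases m with
      | zero => simp [hcnt]
      | succ m => simp [hcnt]
    · have hjl : j ∈ l := by
        rcases List.mem_cons.mp hj with h | h
        · exact absurd h.symm hxj
        · exact h
      have hxltj : x < j := hx j hjl
      cases m with
      | zero => simp
      | succ m =>
        have ihm := ih (List.pairwise_cons.mp hl).2 hjl m
        rw [List.take_succ_cons, List.mem_cons, List.countP_cons]
        rw [show (if (decide (x < j)) = true then 1 else 0) = 1 by simp [hxltj]]
        constructor
        · rintro (h | h)
          · exact absurd h.symm hxj
          · have := ihm.mp h
            omega
        · intro h
          right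
          exact ihm.mpr (by omega)

theorem cntP_lt (p : Int → Bool) (l : List Int) (a : Int) (h : a ∈ l) (hp : p a = false) :
    l.countP p < l.length := by
  refine Nat.lt_of_le_of_ne List.countP_le_length fun he => ?_
  have := (List.countP_eq_length).mp he a h
  simp [hp] at this

-- facts about uListP
theorem uListP_pairwise (g t : List Char) : (uListP g t).Pairwise (· < ·) :=
  List.Pairwise.filter _ (by decide : idx5.Pairwise (· < ·))

theorem mem_uListP_bound (g t : List Char) (i : Int) (h : i ∈ uListP g t) : 0 ≤ i ∧ i < 5 := by
  have := (List.mem_filter.mp h).1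
  simp [idx5] at this
  rcases this with h | h | h | h | h <;> omega

theorem mem_uListP_iff (g t : List Char) (i : Int) :
    i ∈ uListP g t ↔ i ∈ idx5 ∧ qeq g t i = false := by
  simp [uListP, List.mem_filter]

-- A's first loop: product fold splits
theorem foldA1 (g t : List Char) (is : List Int) :
    ∀ (res : List Char) (s : PySem.Set Int), is.Nodup → (∀ i ∈ is, i ∉ s) →
    is.foldl (fun (st : List Char × PySem.Set Int) i =>
        if PySem.List.pyGet? g i = PySem.List.pyGet? t i then (st.1.set i.toNat 'G', st.2)
        else (st.1, PySem.Set.add st.2 i)) (res, s) =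
      (is.foldl (fun r i => if qeq g t i then r.set i.toNat 'G' else r) res,
       s ++ is.filter (fun i => !qeq g t i)) := by
  induction is with
  | nil => intro res s _ _; simp
  | cons i is ih =>
    intro res s hnd hdis
    have hnd' := (List.nodup_cons.mp hnd).2
    by_cases h : PySem.List.pyGet? g i = PySem.List.pyGet? t i
    · have hq : qeq g t i = true := beq_iff_eq.mpr h
      rw [List.foldl_cons, List.filter_cons, if_pos h]
      simp only [hq, Bool.not_true]
      rw [ih _ _ hnd' (fun x hx => hdis x (by simp [hx]))]
      simp [hq]
    · have hq : qeq g t i = false := by simp [qeq, h]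
      have hadd : PySem.Set.add s i = s ++ [i] := by
        have : i ∉ s := hdis i (by simp)
        simp [PySem.Set.add, PySem.Set.contains, this]
      rw [List.foldl_cons, List.filter_cons, if_neg h]
      simp only [hq, Bool.not_false]
      rw [hadd, ih _ _ hnd' ?side]
      case side =>
        intro x hx
        simp only [List.mem_append, List.mem_singleton]
        rintro (hxs | rfl)
        · exact hdis x (by simp [hx]) hxs
        · exact (List.nodup_cons.mp hnd).1 hx
      simp [hq]

theorem get_res0 (g t : List Char) (is : List Int) (res : List Char) (j : Nat)
    (hnn : ∀ i ∈ is, 0 ≤ i) :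
    (is.foldl (fun r i => if qeq g t i then r.set i.toNat 'G' else r) res)[j]? =
      if (j : Int) ∈ is.filter (qeq g t) ∧ j < res.length then some 'G' else res[j]? := by
  rw [PySem.List.foldl_if_eq_foldl_filter]
  exact get_setFold _ _ _ _ (fun i hi => hnn i (List.mem_filter.mp hi).1)


def takenL (g t : List Char) (k : Char) : List Int :=
  ((uListP g t).filter (fun i => PySem.List.pyGet? g i == some k)).take
    (min ((guP g t).count k : Int) ((PySem.Dict.counter (tuA g t)).getD k 0)).toNat

theorem mem_takenL_sub (g t : List Char) (k : Char) (i : Int) (h : i ∈ takenL g t k) :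
    i ∈ uListP g t := List.mem_of_mem_filter (List.mem_of_mem_take h)

theorem mem_takenL_match (g t : List Char) (k : Char) (i : Int) (h : i ∈ takenL g t k) :
    PySem.List.pyGet? g i = some k := by
  have := List.of_mem_filter (List.mem_of_mem_take h)
  exact beq_iff_eq.mp this

theorem foldItems (g t : List Char) (ks : List Char) : ∀ (res : List Char), res.length = 5 →
    (∀ k ∈ ks, k ∈ guP g t) → ∀ j : Nat, j < 5 →
    ((ks.map (fun k => (k, ((guP g t).count k : Int)))).foldl (fun res kc =>
        if (PySem.Dict.counter (tuA g t)).contains kc.1 = true then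
          gcInner g kc.1 (uListP g t) res (min kc.2 ((PySem.Dict.counter (tuA g t)).getD kc.1 0))
        else res) res)[j]? =
      (if ∃ k ∈ ks, (j : Int) ∈ takenL g t k then some 'Y' else res[j]?) := by
  induction ks with
  | nil => intro res _ _ j _; simp
  | cons k ks ih =>
    intro res hlen hks j hj
    rw [List.map_cons, List.foldl_cons]
    by_cases hc : (PySem.Dict.counter (tuA g t)).contains k = true
    · have hmemT : k ∈ tuA g t := by
        rw [PySem.Dict.contains_counter] at hc
        exact List.contains_iff_mem.mp hc
      have hcT : 1 ≤ ((PySem.Dict.counter (tuA g t)).getD k 0) := by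
        rw [PySem.Dict.getD_counter]
        exact_mod_cast List.count_pos_iff.mpr hmemT
      have hcg : 1 ≤ ((guP g t).count k : Int) := by
        exact_mod_cast List.count_pos_iff.mpr (hks k (by simp))
      have hn : 1 ≤ min ((guP g t).count k : Int) ((PySem.Dict.counter (tuA g t)).getD k 0) :=
        le_min hcg hcT
      rw [if_pos hc, gcInner_eq g k _ res _ hn]
      have hres1len : (((uListP g t).filter (fun i => PySem.List.pyGet? g i == some k)).take
          (min ((guP g t).count k : Int) ((PySem.Dict.counter (tuA g t)).getD k 0)).toNat |>.foldl
          (fun r i => r.set i.toNat 'Y') res).length = 5 := by rw [len_setFold]; exact hlen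
      rw [ih _ hres1len (fun x hx => hks x (by simp [hx])) j hj]
      have hget := get_setFold (takenL g t k) 'Y' res j
        (fun i hi => (mem_uListP_bound g t i (mem_takenL_sub g t k i hi)).1)
      rw [show (((uListP g t).filter (fun i => PySem.List.pyGet? g i == some k)).take
          (min ((guP g t).count k : Int) ((PySem.Dict.counter (tuA g t)).getD k 0)).toNat)
          = takenL g t k from rfl] at *
      by_cases h1 : ∃ k' ∈ ks, (j : Int) ∈ takenL g t k'
      · rw [if_pos h1, if_pos (by rcases h1 with ⟨k', hk', hjk'⟩; exact ⟨k', by simp [hk'], hjk'⟩)]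
      · rw [if_neg h1, hget]
        by_cases h2 : (j : Int) ∈ takenL g t k
        · rw [if_pos ⟨h2, by omega⟩, if_pos ⟨k, by simp, h2⟩]
        · have hnot : ¬ ∃ k' ∈ k :: ks, (j : Int) ∈ takenL g t k' := by
            rintro ⟨k', hk', hjk'⟩
            rcases List.mem_cons.mp hk' with h | h
            · exact h2 (h ▸ hjk')
            · exact h1 ⟨k', h, hjk'⟩
          rw [if_neg (fun hh => h2 hh.1), if_neg hnot]
    · rw [if_neg hc, ih _ hlen (fun x hx => hks x (by simp [hx])) j hj]
      have hempty : takenL g t k = [] := by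
        have hcnt : (tuA g t).count k = 0 := by
          rw [List.count_eq_zero]
          intro hmem
          exact hc (by rw [PySem.Dict.contains_counter]; exact List.contains_iff_mem.mpr hmem)
        have : (PySem.Dict.counter (tuA g t)).getD k 0 = 0 := by
          rw [PySem.Dict.getD_counter, hcnt]; rfl
        rw [takenL, this]
        have : min ((guP g t).count k : Int) 0 = 0 := by omega
        rw [this]
        rfl
      congr 1
      · simp only [eq_iff_iff]
        constructor
        · rintro ⟨k', hk', hjk'⟩
          exact ⟨k', by simp [hk'], hjk'⟩
        · rintro ⟨k', hk', hjk'⟩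
          rcases List.mem_cons.mp hk' with h | h
          · rw [h, hempty] at hjk'
            exact absurd hjk' (by simp)
          · exact ⟨k', h, hjk'⟩

theorem filt_sorted_eq (l U : List Int) (hl : l.Pairwise (· < ·)) (hU : U.Pairwise (· < ·))
    (hperm : (l.filter (fun j => decide (j ∈ U))).Perm U) :
    l.filter (fun j => decide (j ∈ U)) = U :=
  hperm.eq_of_pairwise (fun a b _ _ hab hba => by omega) (List.Pairwise.filter _ hl) hU

theorem filt_range_eq (L : Int) (g t : List Char) (h5 : 5 ≤ L) :
    (PySem.List.pyRange 0 L 1).filter (fun j => PySem.Set.contains (uListP g t) j)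
      = uListP g t := by
  have hpred : (fun j => PySem.Set.contains (uListP g t) j)
      = (fun j => decide (j ∈ uListP g t)) := by
    funext j; simp [PySem.Set.contains]
  rw [hpred]
  apply filt_sorted_eq _ _ (PySem.List.pairwise_lt_pyRange_one 0 L) (uListP_pairwise g t)
  apply (List.perm_ext_iff_of_nodup (List.Nodup.filter _ (PySem.List.nodup_pyRange_one 0 L))
    (List.Pairwise.imp (fun h => by omega) (uListP_pairwise g t))).mpr
  intro x
  rw [List.mem_filter]
  simp only [decide_eq_true_eq]
  constructor
  · rintro ⟨_, hx⟩; exact hx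
  · intro hx
    refine ⟨?_, hx⟩
    have := mem_uListP_bound g t x hx
    rw [PySem.List.mem_pyRange_one]
    omega

theorem enum_filter_eq (xs : List Char) (g t : List Char) (h5 : 5 ≤ xs.length) :
    ((PySem.List.enumerate xs).filter (fun p => PySem.Set.contains (uListP g t) p.1)).map (·.2)
      = (uListP g t).map (fun i => PySem.List.pyGetD xs i '?') := by
  rw [PySem.List.enumerate_eq_map_pyRange (d := '?'), List.filter_map, List.map_map]
  have h1 : ((fun (p : Int × Char) => PySem.Set.contains (uListP g t) p.1) ∘
      (fun j => (j, PySem.List.pyGetD xs j '?'))) = fun j => PySem.Set.contains (uListP g t) j := rfl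
  have h2 : ((fun (p : Int × Char) => p.2) ∘ (fun j => (j, PySem.List.pyGetD xs j '?')))
      = fun j => PySem.List.pyGetD xs j '?' := rfl
  rw [h1, h2, filt_range_eq _ g t (by simp [PySem.List.len]; omega)]

theorem pyGet?_eq_getD (xs : List Char) (i : Int) (h0 : 0 ≤ i) (hl : i < xs.length) :
    PySem.List.pyGet? xs i = some (PySem.List.pyGetD xs i '?') := by
  rw [PySem.List.pyGet?_eq_some_getElem xs h0 hl, PySem.List.pyGetD_eq_getElem xs '?' h0 hl]

theorem mem_idx5 (j : Nat) (hj : j < 5) : (j : Int) ∈ idx5 := by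
  simp [idx5]
  omega

theorem cTP_eq (g t : List Char) (h5t : 5 ≤ t.length) (h5g : 5 ≤ g.length)
    (j : Nat) (hj : j < 5) :
    cTP g t (j : Int) = (tuA g t).count (PySem.List.pyGetD g (j : Int) '?') := by
  unfold cTP tuA
  rw [List.map_congr_left (fun x hx => by
    have hb := mem_uListP_bound g t x hx
    exact pyGet?_eq_getD t x hb.1 (by omega))]
  rw [pyGet?_eq_getD g (j : Int) (by omega) (by omega)]
  rw [show ((uListP g t).map (fun i => some (PySem.List.pyGetD t i '?')))
      = ((uListP g t).map (fun i => PySem.List.pyGetD t i '?')).map some from by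
    rw [List.map_map]; rfl]
  exact List.count_map_of_injective _ some (Option.some_injective _) _

theorem guP_count_eq (g t : List Char) (h5g : 5 ≤ g.length) (k : Char) :
    (guP g t).count k
      = ((uListP g t).filter (fun x => PySem.List.pyGet? g x == some k)).length := by
  unfold guP
  rw [List.count, List.countP_map, ← List.countP_eq_length_filter]
  apply List.countP_congr
  intro x hx
  have hb := mem_uListP_bound g t x hx
  simp only [Function.comp_apply, pyGet?_eq_getD g x hb.1 (by omega)]
  simp

theorem rankP_eq (g t : List Char) (h5g : 5 ≤ g.length) (j : Nat) (hj : j < 5) :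
    ((uListP g t).filter (fun x =>
        PySem.List.pyGet? g x == some (PySem.List.pyGetD g (j : Int) '?'))).countP
      (fun x => decide (x < (j : Int))) = rankP g t (j : Int) := by
  unfold rankP
  rw [List.countP_filter]
  apply List.countP_congr
  intro x hx
  rw [pyGet?_eq_getD g (j : Int) (by omega) (by omega)]
  rw [Bool.and_comm]

theorem ycond_iff (g t : List Char) (h5g : 5 ≤ g.length) (h5t : 5 ≤ t.length)
    (j : Nat) (hj : j < 5) (hne : qeq g t (j : Int) = false) :
    (∃ k ∈ PySem.Set.ofList (guP g t), (j : Int) ∈ takenL g t k)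
      ↔ rankP g t (j : Int) < cTP g t (j : Int) := by
  have hk : PySem.List.pyGet? g (j : Int) = some (PySem.List.pyGetD g (j : Int) '?') :=
    pyGet?_eq_getD g (j : Int) (by omega) (by omega)
  have hju : (j : Int) ∈ uListP g t := (mem_uListP_iff g t _).mpr ⟨mem_idx5 j hj, hne⟩
  have hFsort : ((uListP g t).filter (fun x =>
      PySem.List.pyGet? g x == some (PySem.List.pyGetD g (j : Int) '?'))).Pairwise (· < ·) :=
    List.Pairwise.filter _ (uListP_pairwise g t)
  have hjF : (j : Int) ∈ (uListP g t).filter (fun x =>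
      PySem.List.pyGet? g x == some (PySem.List.pyGetD g (j : Int) '?')) :=
    List.mem_filter.mpr ⟨hju, by rw [hk]; exact beq_self_eq_true _⟩
  have hcg := guP_count_eq g t h5g (PySem.List.pyGetD g (j : Int) '?')
  have hcT := PySem.Dict.getD_counter (tuA g t) (PySem.List.pyGetD g (j : Int) '?')
  have hcTP := cTP_eq g t h5t h5g j hj
  have hrank := rankP_eq g t h5g j hj
  have hltc : rankP g t (j : Int) < ((uListP g t).filter (fun x =>
      PySem.List.pyGet? g x == some (PySem.List.pyGetD g (j : Int) '?'))).length := by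
    rw [← hrank]
    exact cntP_lt _ _ _ hjF (by simp)
  have hmin : (min (((guP g t).count (PySem.List.pyGetD g (j : Int) '?') : Nat) : Int)
      ((PySem.Dict.counter (tuA g t)).getD (PySem.List.pyGetD g (j : Int) '?') 0)).toNat
      = min ((guP g t).count (PySem.List.pyGetD g (j : Int) '?'))
          ((tuA g t).count (PySem.List.pyGetD g (j : Int) '?')) := by
    rw [hcT]; omega
  constructor
  · rintro ⟨k', _, hjtaken⟩
    have hk' : k' = PySem.List.pyGetD g (j : Int) '?' := by
      have := mem_takenL_match g t k' (j : Int) hjtaken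
      rw [hk] at this
      exact (Option.some_injective _ this).symm
    rw [hk', takenL] at hjtaken
    have := (mem_take_sorted _ hFsort _ hjF _).mp hjtaken
    rw [hrank, hmin] at this
    rw [hcTP]
    omega
  · intro hlt
    rw [hcTP] at hlt
    refine ⟨PySem.List.pyGetD g (j : Int) '?',
      (PySem.Set.mem_ofList _ _).mpr (List.mem_map.mpr ⟨(j : Int), hju, rfl⟩), ?_⟩
    rw [takenL]
    apply (mem_take_sorted _ hFsort _ hjF _).mpr
    rw [hrank, hmin]
    rw [hcg] at *
    omega

theorem foldItems_len (g t : List Char) (ks : List Char) : ∀ (res : List Char),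
    (∀ k ∈ ks, k ∈ guP g t) →
    ((ks.map (fun k => (k, ((guP g t).count k : Int)))).foldl (fun res kc =>
        if (PySem.Dict.counter (tuA g t)).contains kc.1 = true then
          gcInner g kc.1 (uListP g t) res (min kc.2 ((PySem.Dict.counter (tuA g t)).getD kc.1 0))
        else res) res).length = res.length := by
  induction ks with
  | nil => intro res _; rfl
  | cons k ks ih =>
    intro res hks
    rw [List.map_cons, List.foldl_cons]
    by_cases hc : (PySem.Dict.counter (tuA g t)).contains k = true
    · have hmemT : k ∈ tuA g t := by
        rw [PySem.Dict.contains_counter] at hc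
        exact List.contains_iff_mem.mp hc
      have hcT : 1 ≤ ((PySem.Dict.counter (tuA g t)).getD k 0) := by
        rw [PySem.Dict.getD_counter]
        exact_mod_cast List.count_pos_iff.mpr hmemT
      have hcg : 1 ≤ ((guP g t).count k : Int) :=
        by exact_mod_cast List.count_pos_iff.mpr (hks k (by simp))
      rw [if_pos hc, ih _ (fun x hx => hks x (by simp [hx])),
        gcInner_eq g k _ res _ (le_min hcg hcT), len_setFold]
    · rw [if_neg hc]
      exact ih _ (fun x hx => hks x (by simp [hx]))

theorem res0_len (g t : List Char) :
    (idx5.foldl (fun r i => if qeq g t i then r.set i.toNat 'G' else r)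
      (List.replicate 5 'B')).length = 5 := by
  rw [PySem.List.foldl_if_eq_foldl_filter, len_setFold, List.length_replicate]

theorem idx5_getElem? (j : Nat) (hj : j < 5) : idx5[j]? = some (j : Int) := by
  interval_cases j <;> rfl

theorem A_target (guess targ : String) (h5g : 5 ≤ guess.toList.length)
    (h5t : 5 ≤ targ.toList.length) :
    genclue guess targ = String.ofList (targetP guess.toList targ.toList) := by
  unfold genclue
  dsimp only
  set g := guess.toList with hg
  set t := targ.toList with ht
  have hrange : PySem.List.pyRange 0 5 1 = idx5 := by decide
  rw [hrange, foldA1 g t idx5 _ _ (by decide) (by intro i _; simp [PySem.Set.empty])]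
  rw [show idx5.filter (fun i => !qeq g t i) = uListP g t from rfl]
  rw [show (PySem.Set.empty ++ uListP g t : List Int) = uListP g t from by
    simp [PySem.Set.empty]]
  rw [enum_filter_eq g g t h5g, enum_filter_eq t g t h5t]
  rw [show (uListP g t).map (fun i => PySem.List.pyGetD g i '?') = guP g t from rfl]
  rw [show (uListP g t).map (fun i => PySem.List.pyGetD t i '?') = tuA g t from rfl]
  rw [PySem.Dict.items_counter]
  dsimp only
  congr 1
  apply List.ext_getElem?
  intro j
  have hlen : ((((PySem.Set.ofList (guP g t)).map (fun k => (k, ((guP g t).count k : Int)))).foldl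
      (fun res kc =>
        if (PySem.Dict.counter (tuA g t)).contains kc.1 = true then
          gcInner g kc.1 (uListP g t) res (min kc.2 ((PySem.Dict.counter (tuA g t)).getD kc.1 0))
        else res)
      (idx5.foldl (fun r i => if qeq g t i then r.set i.toNat 'G' else r)
        (List.replicate 5 'B')))).length = 5 := by
    rw [foldItems_len g t _ _ (fun k hk => (PySem.Set.mem_ofList _ _).mp hk), res0_len]
  by_cases hj : j < 5
  · rw [foldItems g t _ _ (by rw [res0_len]) (fun k hk => (PySem.Set.mem_ofList _ _).mp hk) j hj]
    rw [get_res0 g t idx5 _ j (by decide)]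
    rw [targetP, List.getElem?_map, idx5_getElem? j hj]
    simp only [Option.map_some]
    by_cases hq : qeq g t (j : Int) = true
    · have hnc : ¬ ∃ k ∈ PySem.Set.ofList (guP g t), (j : Int) ∈ takenL g t k := by
        rintro ⟨k, _, hjk⟩
        have := (mem_uListP_iff g t _).mp (mem_takenL_sub g t k _ hjk)
        rw [hq] at this
        exact absurd this.2 (by simp)
      rw [if_neg hnc, if_pos (by
        refine ⟨List.mem_filter.mpr ⟨mem_idx5 j hj, hq⟩, ?_⟩
        rw [List.length_replicate]; omega), hq, if_pos rfl]
    · have hne : qeq g t (j : Int) = false := by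
        revert hq; cases qeq g t (j : Int) <;> simp
      rw [hne]
      have hyc := ycond_iff g t h5g h5t j hj hne
      by_cases hy : rankP g t (j : Int) < cTP g t (j : Int)
      · rw [if_pos (hyc.mpr hy)]
        simp [hy]
      · rw [if_neg (fun hc => hy (hyc.mp hc)),
          if_neg (by rintro ⟨hmem, _⟩
                     have := List.mem_filter.mp hmem
                     rw [hne] at this
                     exact absurd this.2 (by simp)),
          List.getElem?_replicate, if_pos hj]
        simp [hy]
  · have h1 : (targetP g t).length = 5 := by simp [targetP, idx5]
    rw [List.getElem?_eq_none (by omega), List.getElem?_eq_none (by omega)]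

theorem B_fold (g t : List Char) (is : List Int) :
    ∀ (pre : List Int), idx5 = pre ++ is →
    ∀ (acc : List Char) (d : PySem.Dict (Option Char) Int),
    (∀ v : Option Char, d.getD v 0 =
      ((((uListP g t).map (fun i => PySem.List.pyGet? t i)).count v : Int)
        - min (((pre.filter (fun x => !qeq g t x)).map
              (fun x => PySem.List.pyGet? g x)).count v : Int)
            (((uListP g t).map (fun i => PySem.List.pyGet? t i)).count v : Int))) →
    (is.foldl (fun (st : List Char × PySem.Dict (Option Char) Int) i =>
        if PySem.List.pyGet? g i = PySem.List.pyGet? t i then (st.1 ++ ['G'], st.2)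
        else if 0 < PySem.Dict.getD st.2 (PySem.List.pyGet? g i) 0 then
          (st.1 ++ ['Y'], PySem.Dict.modify st.2 (PySem.List.pyGet? g i) 0 (· - 1))
        else (st.1 ++ ['B'], st.2)) (acc, d)).1 =
      acc ++ is.map (fun i => if qeq g t i then 'G'
        else if rankP g t i < cTP g t i then 'Y' else 'B') := by
  induction is with
  | nil => intro pre _ acc d _; simp
  | cons i is ih =>
    intro pre hsplit acc d hinv
    have hpw : (pre ++ i :: is).Pairwise (· < ·) := by
      rw [← hsplit]; decide
    have hparts := List.pairwise_append.mp hpw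
    have hpre : ∀ x ∈ pre, x < i := fun x hx => hparts.2.2 x hx i (by simp)
    have his : ∀ x ∈ is, i < x := fun x hx => (List.pairwise_cons.mp hparts.2.1).1 x hx
    have hsplit' : idx5 = (pre ++ [i]) ++ is := by
      rw [hsplit, List.append_assoc]; rfl
    have hfilstep : ∀ (b : Bool), qeq g t i = b →
        (pre ++ [i]).filter (fun x => !qeq g t x)
          = pre.filter (fun x => !qeq g t x) ++ (if b then [] else [i]) := by
      intro b hb
      rw [List.filter_append]
      cases b
      · simp [hb]
      · simp [hb]
    rw [List.foldl_cons, List.map_cons]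
    by_cases hq : PySem.List.pyGet? g i = PySem.List.pyGet? t i
    · have hqt : qeq g t i = true := beq_iff_eq.mpr hq
      rw [if_pos hq, ih (pre ++ [i]) hsplit' _ _ (by
        dsimp only
        intro v
        rw [hfilstep true hqt]
        simp only [if_true, List.append_nil]
        exact hinv v)]
      rw [hqt, if_pos rfl, List.append_assoc]
      rfl
    · have hqf : qeq g t i = false := by simp [qeq, hq]
      have hK1 : (((pre.filter (fun x => !qeq g t x)).map
            (fun x => PySem.List.pyGet? g x)).count (PySem.List.pyGet? g i) : Nat)
          = rankP g t i := by
        rw [List.count, List.countP_map, rankP]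
        rw [show uListP g t = (pre.filter (fun x => !qeq g t x))
            ++ ((i :: is).filter (fun x => !qeq g t x)) from by
          rw [uListP, hsplit, List.filter_append]]
        rw [List.countP_append]
        have h2 : ((i :: is).filter (fun x => !qeq g t x)).countP
            (fun x => PySem.List.pyGet? g x == PySem.List.pyGet? g i && decide (x < i)) = 0 := by
          rw [List.countP_eq_zero]
          intro a ha
          have hmem := List.mem_of_mem_filter ha
          rcases List.mem_cons.mp hmem with rfl | hmem'
          · simp
          · have := his a hmem'
            simp [show ¬(a < i) from by omega]
        rw [h2, Nat.add_zero]
        apply List.countP_congr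
        intro x hx
        have := hpre x (List.mem_of_mem_filter hx)
        simp only [Function.comp_apply]
        simp [show x < i from this]
      have hinvv := hinv (PySem.List.pyGet? g i)
      have hcnt1 : List.count (PySem.List.pyGet? g i)
          (([i].map (fun x => PySem.List.pyGet? g x)) : List (Option Char)) = 1 := by
        simp
      rw [if_neg hq]
      by_cases hpos : 0 < PySem.Dict.getD d (PySem.List.pyGet? g i) 0
      · have hrlt : rankP g t i < cTP g t i := by
          rw [cTP, ← hK1]
          omega
        have hrlt' := hrlt
        rw [cTP, ← hK1] at hrlt'
        rw [if_pos hpos, ih (pre ++ [i]) hsplit' _ _ (by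
          dsimp only
          intro w
          rw [PySem.Dict.getD_modify, hfilstep false hqf]
          simp only [if_false, Bool.false_eq_true]
          rw [List.map_append, List.count_append]
          by_cases hw : w = PySem.List.pyGet? g i
          · subst hw
            rw [if_pos rfl, hinvv, hcnt1]
            omega
          · rw [if_neg hw, hinv w,
              show List.count w (([i].map (fun x => PySem.List.pyGet? g x)) : List (Option Char)) = 0 from
                List.count_eq_zero.mpr (by simp [hw]), Nat.add_zero])]
        rw [hqf]
        simp only [Bool.false_eq_true, if_false, if_pos hrlt, List.append_assoc]
        rfl
      · have hrge : ¬ rankP g t i < cTP g t i := by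
          rw [cTP, ← hK1]
          omega
        have hrge' := hrge
        rw [cTP, ← hK1] at hrge'
        rw [if_neg hpos, ih (pre ++ [i]) hsplit' _ _ (by
          dsimp only
          intro w
          rw [hfilstep false hqf]
          simp only [if_false, Bool.false_eq_true]
          rw [List.map_append, List.count_append]
          by_cases hw : w = PySem.List.pyGet? g i
          · subst hw
            rw [hinvv, hcnt1]
            omega
          · rw [hinv w,
              show List.count w (([i].map (fun x => PySem.List.pyGet? g x)) : List (Option Char)) = 0 from
                List.count_eq_zero.mpr (by simp [hw]), Nat.add_zero])]
        rw [hqf]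
        simp only [Bool.false_eq_true, if_false, if_neg hrge, List.append_assoc]
        rfl

theorem B_target (guess targ : String) :
    genclue_alt guess targ = String.ofList (targetP guess.toList targ.toList) := by
  unfold genclue_alt
  dsimp only
  set g := guess.toList with hg
  set t := targ.toList with ht
  have hrange : PySem.List.pyRange 0 5 1 = idx5 := by decide
  rw [hrange]
  rw [show idx5.filter (fun i => !(PySem.List.pyGet? g i == PySem.List.pyGet? t i))
      = uListP g t from rfl]
  rw [B_fold g t idx5 [] rfl [] _ (by
    intro v
    rw [PySem.Dict.getD_counter]
    simp)]
  rw [List.nil_append]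
  rfl

-- ===== VERDICT (by name: the statement is the Claim_ definition above) =====
theorem genclue_spec : Claim_equal_genclue := by
  intro guess targ _ hpre
  unfold Spec_genclue
  rw [A_target guess targ hpre.1 hpre.2, B_target guess targ]
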